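-- pv_equiv track=rewrite | github.com/pxmars/text-mining-project | src/entities_identification.py | identifyEntity
-- ===== SOURCE A (Python) =====
-- def identifyEntity(tweet, entities):
--     """
--     Identify the target entity of the tweet from the list of entities
--     :param tweet:
--     :param entities:
--     :return:
--     """
--     best_score = 0  # best score over all entities
--     targetEntity = ""  # the entity corresponding to the best score
--     for word in tweet:
--         for entity in entities:
--             cur_score = 0  # the score for the current entity
--             if word == entity:
--                 cur_score = 1  # set the current score to 1 in case the entity name is mentioned in the tweet
--             for entity_related_word in entities[entity]:
--                 if word == entity_related_word:
--                     cur_score = cur_score + 1  # increment the current score by 1 in case a related term to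
--                     # the current entity is mentioned in the tweet
--             if cur_score > best_score:  # update the best score and the target entity
--                 best_score = cur_score
--                 targetEntity = entity
--     return targetEntity
-- ===== SOURCE B (Python) =====
-- def identifyEntity(tweet, entities):
--     # Build a word -> (best single-word score, entity) index once, then scan the tweet.
--     index = {}
--     for entity, related in entities.items():
--         scores = {}
--         for w in related:
--             scores[w] = scores.get(w, 0) + 1
--         scores[entity] = scores.get(entity, 0) + 1
--         for w, s in scores.items():
--             if s > index.get(w, (0, ""))[0]:
--                 index[w] = (s, entity)
--     best_score = 0
--     targetEntity = ""
--     for word in tweet: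
--         s, e = index.get(word, (0, ""))
--         if s > best_score:
--             best_score = s
--             targetEntity = e
--     return targetEntity
-- ===== Notes on version B (the rewrite author's own statement) =====
-- stated objective: faster
-- what changed: B precomputes a word -> (best single-word score, entity) index from the entities once, then resolves each tweet word by a single dictionary lookup, instead of rescanning every entity and its related-word list for every tweet word.
import Mathlib
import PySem

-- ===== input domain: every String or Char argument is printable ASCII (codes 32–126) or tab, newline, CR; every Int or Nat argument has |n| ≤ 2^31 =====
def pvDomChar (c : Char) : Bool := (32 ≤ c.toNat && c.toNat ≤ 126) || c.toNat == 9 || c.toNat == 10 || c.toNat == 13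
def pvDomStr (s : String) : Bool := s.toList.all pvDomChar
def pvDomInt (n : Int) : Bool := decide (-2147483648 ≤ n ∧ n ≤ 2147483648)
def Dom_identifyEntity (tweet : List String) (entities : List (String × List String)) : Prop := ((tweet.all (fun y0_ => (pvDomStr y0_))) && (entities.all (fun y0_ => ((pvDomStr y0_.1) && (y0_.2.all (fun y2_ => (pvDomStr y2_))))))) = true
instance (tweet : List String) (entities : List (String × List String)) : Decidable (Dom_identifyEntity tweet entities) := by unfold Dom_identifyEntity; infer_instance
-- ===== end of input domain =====

-- B replaces A's rescan of every entity and its related-word list per tweet word by a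
-- word -> (best single-word score, entity) index built once from the entities.

-- ===== PORT A =====
-- 'entities' is a Python dict: iteration and lookup go through PySem.Dict.ofList entities.
def identifyEntity (tweet : List String) (entities : List (String × List String)) : String :=
  let d := PySem.Dict.ofList entities
  (tweet.foldl (fun st word =>
      d.items.foldl (fun st p =>
          let cur : Int := if word == p.1 then 1 else 0
          let cur := (d.getD p.1 []).foldl (fun c r => if word == r then c + 1 else c) cur
          if cur > st.1 then (cur, p.1) else st) st)
    ((0 : Int), "")).2

-- ===== PORT B =====
-- one iteration of Source B's 'for entity, related in entities.items():' loop
def pvEntityStep (index : PySem.Dict String (Int × String)) (p : String × List String) :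
    PySem.Dict String (Int × String) :=
  let scores : PySem.Dict String Int :=
    p.2.foldl (fun s w => s.insert w (s.getD w 0 + 1)) PySem.Dict.empty
  let scores := scores.insert p.1 (scores.getD p.1 0 + 1)
  scores.items.foldl (fun index q =>
      if q.2 > (index.getD q.1 ((0 : Int), "")).1 then index.insert q.1 (q.2, p.1) else index)
    index

def identifyEntity_alt (tweet : List String) (entities : List (String × List String)) : String :=
  let d := PySem.Dict.ofList entities
  let index := d.items.foldl pvEntityStep PySem.Dict.empty
  (tweet.foldl (fun st word =>
      let b := index.getD word ((0 : Int), "")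
      if b.1 > st.1 then b else st)
    ((0 : Int), "")).2

-- ===== PRECONDITION & SPEC =====
def Spec_identifyEntity (tweet : List String) (entities : List (String × List String)) (out : String) : Prop := out = identifyEntity_alt tweet entities
instance (tweet : List String) (entities : List (String × List String)) (out : String) : Decidable (Spec_identifyEntity tweet entities out) := by unfold Spec_identifyEntity; infer_instance

-- ===== CLAIM (what is proved, stated in full; the proofs are below) =====
def Claim_equal_identifyEntity : Prop := ∀ (tweet : List String) (entities : List (String × List String)), Dom_identifyEntity tweet entities → Spec_identifyEntity tweet entities (identifyEntity tweet entities)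

-- ===== LEMMAS AND PROOFS =====

-- the single-word score of word w against entity p, and the strict-improvement step both loops perform
def pvScore (w : String) (p : String × List String) : Int :=
  (if w == p.1 then 1 else 0) + (p.2.count w : Int)

def pvStep (w : String) (st : Int × String) (p : String × List String) : Int × String :=
  if pvScore w p > st.1 then (pvScore w p, p.1) else st

lemma pvScore_nonneg (w : String) (p : String × List String) : 0 ≤ pvScore w p := by
  unfold pvScore; split <;> omega

lemma pvStep_fst_nonneg (w : String) (st : Int × String) (p : String × List String)
    (h : 0 ≤ st.1) : 0 ≤ (pvStep w st p).1 := by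
  unfold pvStep; split
  · exact pvScore_nonneg w p
  · exact h

lemma pvFoldl_fst_nonneg (w : String) (l : List (String × List String)) :
    ∀ st : Int × String, 0 ≤ st.1 → 0 ≤ (l.foldl (pvStep w) st).1 := by
  induction l with
  | nil => intro st h; exact h
  | cons p t ih => intro st h; exact ih _ (pvStep_fst_nonneg w st p h)

-- running strict-max with a different (nonnegative) start
lemma pvFoldl_shift (w : String) (l : List (String × List String)) :
    ∀ st : Int × String, 0 ≤ st.1 →
      l.foldl (pvStep w) st =
        (if (l.foldl (pvStep w) ((0 : Int), "")).1 > st.1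
         then l.foldl (pvStep w) ((0 : Int), "") else st) := by
  induction l with
  | nil => intro st h; simp; omega
  | cons p t ih =>
    intro st h
    have hg : 0 ≤ (t.foldl (pvStep w) ((0 : Int), "")).1 :=
      pvFoldl_fst_nonneg w t _ (by simp)
    have hs := pvScore_nonneg w p
    simp only [List.foldl_cons]
    rw [ih _ (pvStep_fst_nonneg w st p h), ih _ (pvStep_fst_nonneg w ((0 : Int), "") p (by simp))]
    unfold pvStep
    split_ifs <;> first | rfl | omega

lemma pvCountFold (w : String) (l : List String) (c0 : Int) :
    l.foldl (fun c r => if w == r then c + 1 else c) c0 = c0 + (l.count w : Int) := by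
  have h := PySem.List.foldl_congr_mem (l := l) (init := c0)
      (f := fun c r => if w == r then c + 1 else c)
      (g := fun c r => if r == w then c + 1 else c)
      (by intro acc x _
          have hc : (w == x) = (x == w) := by
            by_cases hx : w = x
            · simp [hx]
            · simp [hx, Ne.symm hx]
          simp only [hc])
  rw [h]
  exact PySem.List.foldl_beq_add_one l w c0

-- Source B's 'scores' dict for entity p
def pvScores (p : String × List String) : PySem.Dict String Int :=
  (PySem.Dict.counter p.2).insert p.1 ((PySem.Dict.counter p.2).getD p.1 0 + 1)

lemma pvScores_getD (p : String × List String) (x : String) :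
    (pvScores p).getD x 0 = pvScore x p := by
  unfold pvScores pvScore
  rw [PySem.Dict.getD_insert]
  by_cases hx : x = p.1
  · simp [hx, PySem.Dict.getD_counter]; omega
  · simp [hx, PySem.Dict.getD_counter]

lemma pvScores_nodup (p : String × List String) : (pvScores p).keys.Nodup := by
  exact PySem.Dict.nodup_keys_insert _ _ _ (PySem.Dict.nodup_keys_counter _)

lemma pvScores_mem (p : String × List String) (x : String) :
    x ∈ (pvScores p).keys ↔ (x = p.1 ∨ x ∈ p.2) := by
  unfold pvScores
  rw [PySem.Dict.mem_keys_insert, PySem.Dict.keys_counter]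
  simp [PySem.Set.mem_ofList]

lemma pvScore_eq_zero (p : String × List String) (x : String)
    (h : x ∉ (pvScores p).keys) : pvScore x p = 0 := by
  rw [pvScores_mem, not_or] at h
  unfold pvScore
  simp [h.1, List.count_eq_zero_of_not_mem h.2]

-- a fold over pairs with distinct keys touches the looked-up key at most once
lemma pvIdxUnch (name w : String) (L : List (String × Int)) :
    ∀ idx : PySem.Dict String (Int × String), w ∉ L.map Prod.fst →
      (L.foldl (fun index q =>
          if q.2 > (index.getD q.1 ((0 : Int), "")).1 then index.insert q.1 (q.2, name) else index)
        idx).getD w ((0 : Int), "") = idx.getD w ((0 : Int), "") := by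
  induction L with
  | nil => intro idx _; rfl
  | cons q t ih =>
    intro idx hw
    simp only [List.map_cons, List.mem_cons] at hw
    rw [not_or] at hw
    simp only [List.foldl_cons]
    rw [ih _ hw.2]
    split
    · rw [PySem.Dict.getD_insert]; simp [hw.1]
    · rfl

lemma pvIdxFold (p : String × List String) (w : String) (L : List (String × Int)) :
    ∀ idx : PySem.Dict String (Int × String),
      (L.map Prod.fst).Nodup → (∀ q ∈ L, q.2 = pvScore q.1 p) →
      (L.foldl (fun index q =>
          if q.2 > (index.getD q.1 ((0 : Int), "")).1 then index.insert q.1 (q.2, p.1) else index)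
        idx).getD w ((0 : Int), "") =
      (if w ∈ L.map Prod.fst then pvStep w (idx.getD w ((0 : Int), "")) p
       else idx.getD w ((0 : Int), "")) := by
  induction L with
  | nil => intro idx _ _; simp
  | cons q t ih =>
    intro idx hnd hv
    simp only [List.map_cons, List.nodup_cons] at hnd
    have hq : q.2 = pvScore q.1 p := hv q (List.mem_cons_self ..)
    simp only [List.foldl_cons, List.map_cons, List.mem_cons]
    by_cases hwq : w = q.1
    · subst hwq
      rw [pvIdxUnch _ _ _ _ hnd.1]
      unfold pvStep
      rw [← hq]
      split
      · simp [PySem.Dict.getD_insert_self]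
      · simp
    · rw [ih _ hnd.2 (fun r hr => hv r (List.mem_cons_of_mem _ hr))]
      have : (if q.2 > (idx.getD q.1 ((0 : Int), "")).1 then idx.insert q.1 (q.2, p.1) else idx).getD w ((0 : Int), "") = idx.getD w ((0 : Int), "") := by
        split
        · rw [PySem.Dict.getD_insert]; simp [hwq]
        · rfl
      rw [this]
      rw [if_congr (or_iff_right hwq) rfl rfl]

lemma pvPerEnt (p : String × List String) (idx : PySem.Dict String (Int × String)) (w : String)
    (h : 0 ≤ (idx.getD w ((0 : Int), "")).1) :
    (pvEntityStep idx p).getD w ((0 : Int), "") = pvStep w (idx.getD w ((0 : Int), "")) p := by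
  unfold pvEntityStep
  rw [PySem.Dict.foldl_insert_getD_add_one_eq_counter]
  show ((pvScores p).items.foldl _ idx).getD w ((0 : Int), "") = _
  rw [pvIdxFold p w (pvScores p).items idx
      (by simpa [PySem.Dict.keys] using pvScores_nodup p)
      (by intro q hq
          have := PySem.Dict.getD_of_mem_items (d := pvScores p) (k := q.1) (v := q.2)
            (by simpa using hq) (pvScores_nodup p) (d0 := 0)
          rw [← this, pvScores_getD])]
  by_cases hw : w ∈ (pvScores p).items.map Prod.fst
  · rw [if_pos hw]
  · have hz : pvScore w p = 0 := pvScore_eq_zero p w (by simpa [PySem.Dict.keys] using hw)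
    simp only [hw, if_false]
    unfold pvStep
    rw [hz]
    simp; omega

lemma pvIndex_getD (w : String) (ents : List (String × List String)) :
    ∀ idx : PySem.Dict String (Int × String),
      (∀ x, 0 ≤ (idx.getD x ((0 : Int), "")).1) →
      (ents.foldl pvEntityStep idx).getD w ((0 : Int), "") =
        ents.foldl (pvStep w) (idx.getD w ((0 : Int), "")) := by
  induction ents with
  | nil => intro idx _; rfl
  | cons p t ih =>
    intro idx hinv
    simp only [List.foldl_cons]
    rw [ih _ (fun x => by rw [pvPerEnt p idx x (hinv x)]; exact pvStep_fst_nonneg x _ p (hinv x)),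
        pvPerEnt p idx w (hinv w)]

-- A's inner loop over the dict items equals the pvStep fold
lemma pvAInner (d : PySem.Dict String (List String)) (hnd : d.keys.Nodup) (w : String)
    (st : Int × String) :
    d.items.foldl (fun st p =>
        let cur : Int := if w == p.1 then 1 else 0
        let cur := (d.getD p.1 []).foldl (fun c r => if w == r then c + 1 else c) cur
        if cur > st.1 then (cur, p.1) else st) st =
      d.items.foldl (pvStep w) st := by
  apply PySem.List.foldl_congr_mem
  intro acc p hp
  have hget : d.getD p.1 [] = p.2 :=
    PySem.Dict.getD_of_mem_items (d := d) (k := p.1) (v := p.2) (by simpa using hp) hnd []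
  simp only [hget, pvCountFold]
  unfold pvStep pvScore
  rfl

-- ===== VERDICT (by name: the statement is the Claim_ definition above) =====
theorem identifyEntity_spec : Claim_equal_identifyEntity := by
  intro tweet entities _
  unfold Spec_identifyEntity
  simp only [identifyEntity, identifyEntity_alt]
  congr 1
  generalize hd : PySem.Dict.ofList entities = d
  have hnd : d.keys.Nodup := hd ▸ PySem.Dict.nodup_keys_ofList entities
  have hidx : ∀ w, (d.items.foldl pvEntityStep PySem.Dict.empty).getD w ((0 : Int), "") =
      d.items.foldl (pvStep w) ((0 : Int), "") := by
    intro w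
    rw [pvIndex_getD w d.items PySem.Dict.empty (by intro x; simp [PySem.Dict.getD_empty])]
    simp [PySem.Dict.getD_empty]
  suffices h : ∀ (tw : List String) (st : Int × String), 0 ≤ st.1 →
      tw.foldl (fun st word =>
        d.items.foldl (fun st p =>
            let cur : Int := if word == p.1 then 1 else 0
            let cur := (d.getD p.1 []).foldl (fun c r => if word == r then c + 1 else c) cur
            if cur > st.1 then (cur, p.1) else st) st) st =
      tw.foldl (fun st word =>
        let b := (d.items.foldl pvEntityStep PySem.Dict.empty).getD word ((0 : Int), "")
        if b.1 > st.1 then b else st) st by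
    exact h tweet ((0 : Int), "") (by simp)
  intro tw
  induction tw with
  | nil => intro st _; rfl
  | cons word t ih =>
    intro st hst
    simp only [List.foldl_cons]
    have hstep : (d.items.foldl (fun st p =>
        let cur : Int := if word == p.1 then 1 else 0
        let cur := (d.getD p.1 []).foldl (fun c r => if word == r then c + 1 else c) cur
        if cur > st.1 then (cur, p.1) else st) st) =
        (let b := (d.items.foldl pvEntityStep PySem.Dict.empty).getD word ((0 : Int), "")
         if b.1 > st.1 then b else st) := by
      rw [pvAInner d hnd word st, hidx word, pvFoldl_shift word d.items st hst]
    rw [hstep]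
    apply ih
    dsimp only
    split
    · rw [hidx word]; exact pvFoldl_fst_nonneg word d.items _ (Int.le_refl 0)
    · exact hst
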